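-- pv_equiv track=rewrite | github.com/jacksonstempel/lipid_docking_benchmark | lipid_benchmark/contacts.py | interaction_type_counts
-- ===== SOURCE A (Python) =====
-- from collections import Counter
-- from typing import Dict, List, Sequence, Set
--
-- def interaction_type_counts(contacts: Sequence[Dict[str, object]]) -> str:
--     counter: Counter[str] = Counter()
--     for c in contacts:
--         ctype = str(c.get("contact_type") or "")
--         if ctype:
--             counter[ctype] += 1
--     if not counter:
--         return "none=0"
--     parts = [f"{k}={counter[k]}" for k in sorted(counter)]
--     return ";".join(parts)
-- ===== SOURCE B (Python) =====
-- from itertools import groupby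
--
--
-- def interaction_type_counts(contacts):
--     types = []
--     for c in contacts:
--         ctype = str(c.get("contact_type") or "")
--         if ctype:
--             types.append(ctype)
--     if not types:
--         return "none=0"
--     return ";".join(f"{k}={len(list(g))}" for k, g in groupby(sorted(types)))
-- ===== Notes on version B (the rewrite author's own statement) =====
-- stated objective: alternative
-- what changed: Replaces the Counter hash-count plus sort-of-distinct-keys strategy with collecting the filtered type strings, sorting them, and counting equal runs via itertools.groupby.
import Mathlib
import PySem

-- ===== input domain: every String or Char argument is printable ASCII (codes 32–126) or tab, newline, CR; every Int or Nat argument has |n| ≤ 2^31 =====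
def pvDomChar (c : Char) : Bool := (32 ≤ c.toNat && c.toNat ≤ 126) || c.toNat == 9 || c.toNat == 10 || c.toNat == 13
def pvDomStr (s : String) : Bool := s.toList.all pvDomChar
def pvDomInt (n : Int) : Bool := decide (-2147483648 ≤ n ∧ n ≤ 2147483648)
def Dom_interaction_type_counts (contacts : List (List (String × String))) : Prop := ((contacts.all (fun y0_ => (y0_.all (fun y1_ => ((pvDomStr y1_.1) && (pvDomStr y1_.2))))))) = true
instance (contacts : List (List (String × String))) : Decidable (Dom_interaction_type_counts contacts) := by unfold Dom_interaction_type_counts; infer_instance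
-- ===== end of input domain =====

-- B replaces A's Counter-then-sort-distinct-keys strategy with sort-the-filtered-types-then-count-runs (groupby); alternative decomposition, same result.


-- ===== PORT A =====
-- ctype = str(c.get("contact_type") or "") — the extraction expression both Pythons share
-- (values are strings, so `or ""` replaces a missing key or "" by "")
def pyCtype (c : List (String × String)) : String :=
  match (PySem.Dict.mk c).get? "contact_type" with
  | none => ""
  | some s => if s = "" then "" else s

def interaction_type_counts (contacts : List (List (String × String))) : String :=
  let counter : PySem.Dict String Int := contacts.foldl (fun d c =>
    let ctype := pyCtype c
    if ctype ≠ "" then d.modify ctype 0 (fun x => x + 1) else d) PySem.Dict.empty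
  if counter.size = 0 then "none=0"
  else
    let parts := (PySem.List.sorted counter.keys (fun k => k) false).map
      (fun k => k ++ "=" ++ PySem.Int.toStr (counter.getD k 0))
    PySem.Str.join ";" parts

-- ===== PORT B =====
-- itertools.groupby over a list: one pair (key, run length) per maximal run of equal elements
def groupRuns : List String → List (String × Int)
  | [] => []
  | x :: xs =>
    (x, ((xs.takeWhile (fun y => y == x)).length : Int) + 1) ::
      groupRuns (xs.dropWhile (fun y => y == x))
termination_by l => l.length
decreasing_by
  simpa using Nat.lt_succ_of_le (List.length_dropWhile_le _ _)

def interaction_type_counts_alt (contacts : List (List (String × String))) : String :=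
  let types : List String := contacts.foldl (fun acc c =>
    let ctype := pyCtype c
    if ctype ≠ "" then acc ++ [ctype] else acc) []
  if types = [] then "none=0"
  else PySem.Str.join ";" ((groupRuns (PySem.List.sorted types (fun k => k) false)).map
      (fun p => p.1 ++ "=" ++ PySem.Int.toStr p.2))

-- ===== PRECONDITION & SPEC =====
def Spec_interaction_type_counts (contacts : List (List (String × String))) (out : String) : Prop := out = interaction_type_counts_alt contacts
instance (contacts : List (List (String × String))) (out : String) : Decidable (Spec_interaction_type_counts contacts out) := by unfold Spec_interaction_type_counts; infer_instance

-- ===== CLAIM (what is proved, stated in full; the proofs are below) =====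
def Claim_equal_interaction_type_counts : Prop := ∀ (contacts : List (List (String × String))), Dom_interaction_type_counts contacts → Spec_interaction_type_counts contacts (interaction_type_counts contacts)

-- ===== LEMMAS AND PROOFS =====

-- the filtered list of contact types, as B's loop builds it
def pvTypes (contacts : List (List (String × String))) : List String :=
  contacts.foldl (fun acc c =>
    let ctype := pyCtype c
    if ctype ≠ "" then acc ++ [ctype] else acc) []

theorem pvTypes_acc (l : List (List (String × String))) (acc : List String) :
    l.foldl (fun acc c =>
      let ctype := pyCtype c
      if ctype ≠ "" then acc ++ [ctype] else acc) acc = acc ++ pvTypes l := by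
  induction l generalizing acc with
  | nil => simp [pvTypes]
  | cons c l ih =>
    rw [List.foldl_cons, ih]
    conv_rhs => rw [pvTypes, List.foldl_cons, ih]
    by_cases h : pyCtype c = "" <;> simp [h]

theorem counter_eq_counter_types (contacts : List (List (String × String))) :
    contacts.foldl (fun d c =>
      let ctype := pyCtype c
      if ctype ≠ "" then d.modify ctype 0 (fun x => x + 1) else d) PySem.Dict.empty
    = PySem.Dict.counter (pvTypes contacts) := by
  rw [PySem.Dict.counter_eq_foldl]
  suffices h : ∀ (l : List (List (String × String))) (d : PySem.Dict String Int),
      l.foldl (fun d c =>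
        let ctype := pyCtype c
        if ctype ≠ "" then d.modify ctype 0 (fun x => x + 1) else d) d
      = (pvTypes l).foldl (fun d x => d.modify x 0 (fun x => x + 1)) d from h _ _
  intro l
  induction l with
  | nil => intro d; simp [pvTypes]
  | cons c l ih =>
    intro d
    rw [List.foldl_cons, ih]
    conv_rhs => rw [pvTypes, List.foldl_cons, pvTypes_acc, List.foldl_append]
    by_cases h : pyCtype c = "" <;> simp [h, pvTypes]

-- run heads of groupRuns are exactly the members of the list
theorem mem_firsts_groupRuns (s : List String) (k : String) :
    k ∈ (groupRuns s).map Prod.fst ↔ k ∈ s := by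
  induction s using groupRuns.induct with
  | case1 => simp [groupRuns]
  | case2 x xs ih =>
    rw [groupRuns]
    simp only [List.map_cons, List.mem_cons, ih]
    constructor
    · rintro (rfl | h)
      · exact Or.inl rfl
      · exact Or.inr ((List.dropWhile_sublist _).mem h)
    · rintro (rfl | h)
      · exact Or.inl rfl
      · rcases List.mem_append.mp
          (by rwa [List.takeWhile_append_dropWhile] :
            k ∈ xs.takeWhile (fun y => y == x) ++ xs.dropWhile (fun y => y == x)) with h | h
        · exact Or.inl (by simpa using List.mem_takeWhile_imp h)
        · exact Or.inr h

-- every element past the leading run of x's is strictly greater than x (needs sortedness)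
theorem lt_of_mem_dropWhile_eq (x : String) (xs : List String)
    (hall : ∀ y ∈ xs, x ≤ y) (hp : xs.Pairwise (· ≤ ·)) :
    ∀ z ∈ xs.dropWhile (fun y => y == x), x < z := by
  induction xs with
  | nil => simp
  | cons a as ih =>
    intro z hz
    rw [List.dropWhile_cons] at hz
    by_cases ha : (a == x) = true
    · rw [if_pos ha] at hz
      exact ih (fun y hy => hall y (List.mem_cons_of_mem _ hy))
        (List.pairwise_cons.mp hp).2 z hz
    · rw [if_neg ha] at hz
      have hxa : x < a :=
        lt_of_le_of_ne (hall a List.mem_cons_self) (Ne.symm (by simpa using ha))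
      rcases List.mem_cons.mp hz with rfl | hz
      · exact hxa
      · exact lt_of_lt_of_le hxa ((List.pairwise_cons.mp hp).1 z hz)

-- on a sorted list: groupRuns pairs each distinct value with its count; run heads strictly increase
theorem groupRuns_sorted (s : List String) (hs : s.Pairwise (· ≤ ·)) :
    groupRuns s = ((groupRuns s).map Prod.fst).map (fun k => (k, (s.count k : Int)))
    ∧ ((groupRuns s).map Prod.fst).Pairwise (· < ·) := by
  induction s using groupRuns.induct with
  | case1 => simp [groupRuns]
  | case2 x xs ih =>
    obtain ⟨hxall, hxs⟩ := List.pairwise_cons.mp hs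
    have hxall' : ∀ y ∈ xs, x ≤ y := hxall
    have hr_p : (xs.dropWhile (fun y => y == x)).Pairwise (· ≤ ·) :=
      hxs.sublist (List.dropWhile_sublist _)
    have hlt := lt_of_mem_dropWhile_eq x xs hxall' hxs
    have hxnotr : x ∉ xs.dropWhile (fun y => y == x) := fun h => lt_irrefl x (hlt x h)
    have hxsplit : xs.takeWhile (fun y => y == x) ++ xs.dropWhile (fun y => y == x) = xs :=
      List.takeWhile_append_dropWhile
    obtain ⟨ih1, ih2⟩ := ih hr_p
    have hcx : (x :: xs).count x = (xs.takeWhile (fun y => y == x)).length + 1 := by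
      rw [List.count_cons_self]
      conv_lhs => rw [← hxsplit]
      rw [List.count_append, List.count_eq_zero.mpr hxnotr,
        List.count_eq_length.mpr
          (fun b hb => (show b = x by simpa using List.mem_takeWhile_imp hb).symm)]
    have hck : ∀ k ∈ (groupRuns (xs.dropWhile (fun y => y == x))).map Prod.fst,
        (xs.dropWhile (fun y => y == x)).count k = (x :: xs).count k := by
      intro k hk
      have hkr : k ∈ xs.dropWhile (fun y => y == x) := (mem_firsts_groupRuns _ _).mp hk
      have hkx : k ≠ x := fun h => lt_irrefl x (h ▸ hlt k hkr)
      have hknott : k ∉ xs.takeWhile (fun y => y == x) := fun h =>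
        hkx (by simpa using List.mem_takeWhile_imp h)
      have h1 : List.count k (x :: xs) = List.count k xs := by
        simp [Ne.symm hkx]
      have h2 : List.count k xs = List.count k (xs.dropWhile (fun y => y == x)) := by
        conv_lhs => rw [← hxsplit]
        rw [List.count_append, List.count_eq_zero.mpr hknott, Nat.zero_add]
      rw [h1, h2]
    have hmemlt : ∀ k ∈ (groupRuns (xs.dropWhile (fun y => y == x))).map Prod.fst, x < k :=
      fun k hk => hlt k ((mem_firsts_groupRuns _ _).mp hk)
    constructor
    · rw [groupRuns]
      simp only [List.map_cons]
      congr 1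
      · rw [hcx]; push_cast [Nat.cast_add]; rfl
      · conv_lhs => rw [ih1]
        exact List.map_congr_left (fun k hk => by rw [hck k hk])
    · rw [groupRuns]
      simp only [List.map_cons]
      exact List.pairwise_cons.mpr ⟨hmemlt, ih2⟩

theorem interaction_type_counts_spec : Claim_equal_interaction_type_counts := by
  intro contacts _
  unfold Spec_interaction_type_counts interaction_type_counts interaction_type_counts_alt
  rw [counter_eq_counter_types,
    show (contacts.foldl (fun acc c =>
      let ctype := pyCtype c
      if ctype ≠ "" then acc ++ [ctype] else acc) ([] : List String)) = pvTypes contacts from rfl]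
  by_cases hT : pvTypes contacts = []
  · rw [hT]
    rfl
  · obtain ⟨y, ys, hys⟩ : ∃ y ys, pvTypes contacts = y :: ys := by
      cases h : pvTypes contacts with
      | nil => exact absurd h hT
      | cons y ys => exact ⟨y, ys, rfl⟩
    have hsz : (PySem.Dict.counter (pvTypes contacts)).size ≠ 0 := by
      have hmem : y ∈ (PySem.Dict.counter (pvTypes contacts)).keys := by
        rw [PySem.Dict.keys_counter]
        exact (PySem.Set.mem_ofList _ _).mpr (by rw [hys]; exact List.mem_cons_self)
      intro h0
      simp only [PySem.Dict.size] at h0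
      simp [PySem.Dict.keys, List.length_eq_zero_iff.mp h0] at hmem
    rw [if_neg hsz, if_neg hT]
    have hsp : (PySem.List.sorted (pvTypes contacts) (fun k => k) false).Pairwise (· ≤ ·) := by
      simpa using PySem.List.sorted_pairwise (pvTypes contacts) (fun k => k)
    obtain ⟨h1, h2⟩ := groupRuns_sorted _ hsp
    have hF : PySem.List.sorted (PySem.Dict.counter (pvTypes contacts)).keys (fun k => k) false
        = (groupRuns (PySem.List.sorted (pvTypes contacts) (fun k => k) false)).map Prod.fst := by
      apply PySem.List.sorted_eq_of_perm_of_pairwise_lt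
      · rw [PySem.Dict.keys_counter]
        apply (List.perm_ext_iff_of_nodup ?_ ?_).mpr
        · intro a
          rw [mem_firsts_groupRuns, PySem.List.mem_sorted, PySem.Set.mem_ofList]
        · exact h2.imp (fun h => LT.lt.ne h)
        · exact PySem.Set.nodup_ofList _
      · exact h2
    have hB : (groupRuns (PySem.List.sorted (pvTypes contacts) (fun k => k) false)).map
          (fun p => p.1 ++ "=" ++ PySem.Int.toStr p.2)
        = ((groupRuns (PySem.List.sorted (pvTypes contacts) (fun k => k) false)).map Prod.fst).map
          (fun k => k ++ "=" ++ PySem.Int.toStr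
            ((PySem.List.sorted (pvTypes contacts) (fun k => k) false).count k : Int)) := by
      conv_lhs => rw [h1]
      rw [List.map_map]
      rfl
    rw [hB, hF]
    dsimp only
    apply congrArg
    apply List.map_congr_left
    intro k hk
    rw [PySem.Dict.getD_counter,
      (PySem.List.sorted_perm (pvTypes contacts) (fun k => k) false).count_eq k]
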